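-- pv_equiv track=rewrite | github.com/UBC-MDS/text_processing_util_mds24 | src/text_processing_util_mds24/text_processing_util_mds24.py | text_clean
-- ===== SOURCE A (Python) =====
-- import string
--
-- def text_clean(docs: list[str]) -> list[list[str]]:
--     """Removes punctuation, turns all characters in each document to lower case, \
--        removes numbers in documents, and splits each document into a list of words.
--
--     Parameters
--     ----------
--     docs : list[str]
--         Documents to be processed.
--         Each item in the list is a document.
--
--     Returns
--     -------
--     list[list[str]]
--         Cleaned documents.
--
--     Examples
--     --------
--     >>> text_clean(["We are group 10.",
--                     "We are the best!"])
--     [["we", "are", "group"], ["we", "are", "the", "best"]]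
--     """
--
--     if not isinstance(docs, list):
--         raise TypeError('Input is not a list')
--     for doc_i, doc in enumerate(docs):
--         if not isinstance(doc, str):
--             raise TypeError(f'Document {doc_i} is not string')
--
--     cleaned_docs: list[str] = []
--
--     for _ in docs:
--         cleaned_docs.append('')
--
--     # remove punctuation and number and lower case everything
--     for doc_i, doc in enumerate(docs):
--         for ch in doc:
--             if not ch.isnumeric() and ch not in string.punctuation:
--                 cleaned_docs[doc_i] += ch.lower()
--
--     out_docs: list[list[str]] = []
--
--     # split by space
--     for doc in cleaned_docs:
--         out_docs.append([wrd for wrd in doc.split(' ') if wrd != ''])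
--
--     return out_docs
-- ===== SOURCE B (Python) =====
-- import string
--
-- def text_clean(docs: list[str]) -> list[list[str]]:
--     if not isinstance(docs, list):
--         raise TypeError('Input is not a list')
--     for doc_i, doc in enumerate(docs):
--         if not isinstance(doc, str):
--             raise TypeError(f'Document {doc_i} is not string')
--     drop = set(string.punctuation)
--     out_docs: list[list[str]] = []
--     for doc in docs:
--         words: list[str] = []
--         cur: list[str] = []
--         for ch in doc:
--             if ch.isnumeric() or ch in drop:
--                 continue
--             if ch == ' ':
--                 if cur:
--                     words.append(''.join(cur))
--                     cur = []
--             else: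
--                 cur.append(ch.lower())
--         if cur:
--             words.append(''.join(cur))
--         out_docs.append(words)
--     return out_docs
-- ===== Notes on version B (the rewrite author's own statement) =====
-- stated objective: alternative
-- what changed: Replaces A's two-phase pipeline (build a cleaned lowercase string per document, then split(' ') and filter empties) with a single per-character pass that builds tokens directly via a current-token accumulator flushed at spaces.
import Mathlib
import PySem

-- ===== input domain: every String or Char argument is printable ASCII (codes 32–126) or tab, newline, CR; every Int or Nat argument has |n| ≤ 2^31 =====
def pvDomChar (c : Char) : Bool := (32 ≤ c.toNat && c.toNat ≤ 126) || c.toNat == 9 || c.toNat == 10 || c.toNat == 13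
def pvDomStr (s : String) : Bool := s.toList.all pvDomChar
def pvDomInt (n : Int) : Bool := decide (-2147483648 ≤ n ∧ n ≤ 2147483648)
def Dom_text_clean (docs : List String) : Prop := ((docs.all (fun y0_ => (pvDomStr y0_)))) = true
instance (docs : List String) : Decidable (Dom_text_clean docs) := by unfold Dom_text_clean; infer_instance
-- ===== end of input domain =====

-- B replaces A's clean-then-split(' ') pipeline with one accumulator-flushing pass; return values proved equal on Dom.

-- ===== PORT A =====
-- string.punctuation (exact ASCII constant)
def pvPunct : List Char := "!\"#$%&'()*+,-./:;<=>?@[\\]^_`{|}~".toList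
-- ch.isnumeric() — exact on the ASCII domain (= isdigit there); ch not in string.punctuation
def pvDrop (c : Char) : Bool := PySem.Chars.isdigit c || pvPunct.contains c
-- cleaned_docs[doc_i] += ch.lower() under A's filter, as the per-document fold
def pvCleanFold (cs : List Char) : List Char :=
  cs.foldl (fun acc ch => if !(pvDrop ch) then acc ++ [PySem.Chars.lowerChar ch] else acc) []
-- doc.split(' ') — hand port, exact for the single-character separator ' '
def pvSplitSp : List Char → List Char → List (List Char)
  | [], cur => [cur]
  | c :: rest, cur => if c = ' ' then cur :: pvSplitSp rest [] else pvSplitSp rest (cur ++ [c])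

def text_clean (docs : List String) : List (List String) :=
  let cleaned := docs.map (fun doc => pvCleanFold doc.toList)
  cleaned.map (fun cs => ((pvSplitSp cs []).filter (· ≠ ([] : List Char))).map (fun w => String.ofList w))

-- ===== PORT B =====
-- flush the current token into the word list when non-empty
def pvFlush (cur : List Char) (words : List (List Char)) : List (List Char) :=
  if cur = [] then words else words ++ [cur]
-- the single per-character pass of B
def pvTokLoop : List Char → List Char → List (List Char) → List (List Char)
  | [], cur, words => pvFlush cur words
  | ch :: rest, cur, words =>
    if pvDrop ch then pvTokLoop rest cur words
    else if ch = ' ' then pvTokLoop rest [] (pvFlush cur words)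
    else pvTokLoop rest (cur ++ [PySem.Chars.lowerChar ch]) words

def text_clean_alt (docs : List String) : List (List String) :=
  docs.map (fun doc => (pvTokLoop doc.toList [] []).map (fun w => String.ofList w))

-- ===== PRECONDITION & SPEC =====
def Spec_text_clean (docs : List String) (out : List (List String)) : Prop := out = text_clean_alt docs
instance (docs : List String) (out : List (List String)) : Decidable (Spec_text_clean docs out) := by unfold Spec_text_clean; infer_instance

-- ===== CLAIM (what is proved, stated in full; the proofs are below) =====
def Claim_equal_text_clean : Prop := ∀ (docs : List String), Dom_text_clean docs → Spec_text_clean docs (text_clean docs)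

-- ===== LEMMAS AND PROOFS =====
-- structural form of A's cleaning fold
def pvCleanL : List Char → List Char
  | [] => []
  | c :: rest => if pvDrop c then pvCleanL rest else PySem.Chars.lowerChar c :: pvCleanL rest

theorem pvCleanFold_acc (cs : List Char) : ∀ acc,
    cs.foldl (fun acc ch => if !(pvDrop ch) then acc ++ [PySem.Chars.lowerChar ch] else acc) acc
      = acc ++ pvCleanL cs := by
  induction cs with
  | nil => simp [pvCleanL]
  | cons c rest ih =>
    intro acc
    rw [List.foldl_cons, ih]
    by_cases h : pvDrop c = true <;> simp [pvCleanL, h]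

theorem pvLower_ne_space (c : Char) (h : c ≠ ' ') : PySem.Chars.lowerChar c ≠ ' ' := by
  unfold PySem.Chars.lowerChar
  split
  · rename_i hu
    unfold PySem.Chars.isupper at hu
    simp [Char.le_def] at hu
    have h1 : 65 ≤ c.toNat := hu.1
    have h2 : c.toNat ≤ 90 := hu.2
    intro he
    have hv : (c.toNat + 32).isValidChar := Or.inl (by omega)
    have : (Char.ofNat (c.toNat + 32)).toNat = (' ' : Char).toNat := by rw [he]
    rw [Char.toNat_ofNat, if_pos hv] at this
    have h32 : (' ' : Char).toNat = 32 := by decide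
    rw [h32] at this
    omega
  · exact h

theorem pvTokLoop_eq (cs : List Char) : ∀ cur words,
    pvTokLoop cs cur words = words ++ (pvSplitSp (pvCleanL cs) cur).filter (· ≠ ([] : List Char)) := by
  induction cs with
  | nil =>
    intro cur words
    by_cases h : cur = ([] : List Char) <;>
      simp [pvTokLoop, pvFlush, pvSplitSp, pvCleanL, h]
  | cons c rest ih =>
    intro cur words
    by_cases hd : pvDrop c = true
    · simp [pvTokLoop, pvCleanL, hd, ih]
    · by_cases hs : c = ' '
      · have hl : PySem.Chars.lowerChar ' ' = ' ' := by decide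
        subst hs
        by_cases hc : cur = ([] : List Char) <;>
          simp [pvTokLoop, pvCleanL, hd, hl, pvSplitSp, pvFlush, hc, ih]
      · have hl := pvLower_ne_space c hs
        simp [pvTokLoop, pvCleanL, hd, hs, pvSplitSp, hl, ih]

-- ===== VERDICT (by name: the statement is the Claim_ definition above) =====
theorem text_clean_spec : Claim_equal_text_clean := by
  intro docs _
  unfold Spec_text_clean text_clean text_clean_alt
  simp only [List.map_map, List.map_inj_left, Function.comp_apply]
  intro doc _
  rw [pvTokLoop_eq]
  unfold pvCleanFold
  rw [pvCleanFold_acc]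
  simp
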